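-- pv_equiv track=rewrite | github.com/fasdog/botgta | bot.py | clean_tracker_lines
-- ===== SOURCE A (Python) =====
-- def clean_tracker_lines(lines, limit=8):
--     cleaned = []
--     bad = ["cookie", "privacy", "terms", "sign in", "join discord", "login", "advertisement"]
--     for line in lines:
--         low = line.lower()
--         if any(x in low for x in bad):
--             continue
--         if len(line) < 2:
--             continue
--         if line not in cleaned:
--             cleaned.append(line)
--         if len(cleaned) >= limit:
--             break
--     return cleaned
-- ===== SOURCE B (Python) =====
-- def clean_tracker_lines(lines, limit=8):
--     bad = ["cookie", "privacy", "terms", "sign in", "join discord", "login", "advertisement"]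
--     filtered = [line for line in lines
--                 if len(line) >= 2 and not any(x in line.lower() for x in bad)]
--     dedup = list(dict.fromkeys(filtered))
--     return dedup[:limit] if limit > 0 else []
-- ===== Notes on version B (the rewrite author's own statement) =====
-- stated objective: simpler
-- what changed: A's single interleaved loop (filter + membership-dedup + post-append break) is split into three separate passes: a filter comprehension, dict.fromkeys for order-preserving dedup, and a slice dedup[:limit] (empty result for non-positive limit).
-- intended difference: For limit <= 0 when at least one line survives both filters, A returns a one-element list with the first surviving line (its break test runs only after an append), while B returns an empty list, the intended 'at most limit results' for a non-positive limit. — e.g. on clean_tracker_lines(["hi"], 0): A returns ["hi"], B returns []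
import Mathlib
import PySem

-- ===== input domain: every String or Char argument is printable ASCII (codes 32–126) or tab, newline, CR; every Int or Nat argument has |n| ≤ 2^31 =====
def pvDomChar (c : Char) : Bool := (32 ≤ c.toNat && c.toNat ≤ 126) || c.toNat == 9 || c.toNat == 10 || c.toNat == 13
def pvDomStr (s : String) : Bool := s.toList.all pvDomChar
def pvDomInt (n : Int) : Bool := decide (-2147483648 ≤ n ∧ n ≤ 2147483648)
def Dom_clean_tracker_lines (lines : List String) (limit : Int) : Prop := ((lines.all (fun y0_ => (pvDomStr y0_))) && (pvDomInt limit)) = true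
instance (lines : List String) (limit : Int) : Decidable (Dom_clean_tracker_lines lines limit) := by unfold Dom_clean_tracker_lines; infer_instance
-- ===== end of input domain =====

-- B splits A's interleaved loop into filter / dedup / slice passes (objective: simpler);
-- for non-positive limit with a surviving line A returns one line, B returns an empty list (see D_).


-- ===== PORT A =====
-- bad = ["cookie", …]
def pvBad : List String :=
  ["cookie", "privacy", "terms", "sign in", "join discord", "login", "advertisement"]

-- A's for-loop with `continue`/`break`, state = cleaned
def pvLoopA (lines : List String) (cleaned : List String) (limit : Int) : List String :=
  match lines with
  | [] => cleaned
  | line :: rest =>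
    let low := PySem.Str.lower line
    if pvBad.any (fun x => PySem.Str.isIn x low) then
      pvLoopA rest cleaned limit
    else if PySem.Str.len line < 2 then
      pvLoopA rest cleaned limit
    else
      let cleaned' := if cleaned.contains line then cleaned else cleaned ++ [line]
      if (cleaned'.length : Int) ≥ limit then cleaned'
      else pvLoopA rest cleaned' limit

def clean_tracker_lines (lines : List String) (limit : Int) : List String :=
  pvLoopA lines [] limit

-- ===== PORT B =====
-- the guard of B's filter comprehension
def pvKeep (line : String) : Bool :=
  PySem.Str.len line ≥ 2 && !(pvBad.any (fun x => PySem.Str.isIn x (PySem.Str.lower line)))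

def clean_tracker_lines_alt (lines : List String) (limit : Int) : List String :=
  let filtered := lines.filter pvKeep
  let dedup := PySem.List.dedup filtered
  if 0 < limit then PySem.List.slice dedup none (some limit) else []

-- ===== PRECONDITION & SPEC =====
-- For limit ≤ 0 when at least one line survives both filters, A returns a one-element list
-- with the first surviving line (its break test runs only after an append), while B returns
-- an empty list, the intended 'at most limit results' for a non-positive limit.
def D_clean_tracker_lines (lines : List String) (limit : Int) : Prop :=
  limit ≤ 0 ∧ ∃ l ∈ lines, 2 ≤ l.toList.length ∧
    ∀ b ∈ ["cookie", "privacy", "terms", "sign in", "join discord", "login", "advertisement"],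
      ¬ b.toList <:+: PySem.Chars.lower l.toList
instance (lines : List String) (limit : Int) : Decidable (D_clean_tracker_lines lines limit) := by unfold D_clean_tracker_lines; infer_instance

def Spec_clean_tracker_lines (lines : List String) (limit : Int) (out : List String) : Prop := ¬ D_clean_tracker_lines lines limit → out = clean_tracker_lines_alt lines limit
instance (lines : List String) (limit : Int) (out : List String) : Decidable (Spec_clean_tracker_lines lines limit out) := by unfold Spec_clean_tracker_lines; infer_instance

def pvDiffWitness_clean_tracker_lines : List String × Int := (["hi"], 0)
def pvDiffWitnessOut_clean_tracker_lines : (List String) × (List String) := (["hi"], [])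

-- ===== CLAIM (what is proved, stated in full; the proofs are below) =====
def Claim_unchanged_clean_tracker_lines : Prop := ∀ (lines : List String) (limit : Int), Dom_clean_tracker_lines lines limit → Spec_clean_tracker_lines lines limit (clean_tracker_lines lines limit)
def Claim_changed_clean_tracker_lines : Prop := Dom_clean_tracker_lines (pvDiffWitness_clean_tracker_lines.1) (pvDiffWitness_clean_tracker_lines.2) ∧ D_clean_tracker_lines (pvDiffWitness_clean_tracker_lines.1) (pvDiffWitness_clean_tracker_lines.2) ∧ clean_tracker_lines (pvDiffWitness_clean_tracker_lines.1) (pvDiffWitness_clean_tracker_lines.2) = pvDiffWitnessOut_clean_tracker_lines.1 ∧ clean_tracker_lines_alt (pvDiffWitness_clean_tracker_lines.1) (pvDiffWitness_clean_tracker_lines.2) = pvDiffWitnessOut_clean_tracker_lines.2 ∧ pvDiffWitnessOut_clean_tracker_lines.1 ≠ pvDiffWitnessOut_clean_tracker_lines.2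
def Claim_exact_clean_tracker_lines : Prop := ∀ (lines : List String) (limit : Int), Dom_clean_tracker_lines lines limit → D_clean_tracker_lines lines limit → clean_tracker_lines lines limit ≠ clean_tracker_lines_alt lines limit

-- ===== LEMMAS AND PROOFS =====

-- D_'s surviving-line condition is exactly the filter guard pvKeep
theorem pvKeep_iff (l : String) :
    pvKeep l = true ↔ (2 ≤ l.toList.length ∧
      ∀ b ∈ ["cookie", "privacy", "terms", "sign in", "join discord", "login",
             "advertisement"], ¬ b.toList <:+: PySem.Chars.lower l.toList) := by
  simp only [pvKeep, pvBad, Bool.and_eq_true, Bool.not_eq_true', List.any_eq_false,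
    PySem.Str.len_eq, decide_eq_true_eq, ge_iff_le]
  constructor
  · rintro ⟨h1, h2⟩
    refine ⟨by exact_mod_cast h1, fun b hb => ?_⟩
    have := h2 b hb
    rw [← PySem.Str.toList_lower, ← PySem.Str.isIn_iff_infix]
    exact this
  · rintro ⟨h1, h2⟩
    refine ⟨by exact_mod_cast h1, fun b hb => ?_⟩
    have := h2 b hb
    rw [PySem.Str.isIn_iff_infix, PySem.Str.toList_lower]
    exact this

-- the accumulator is a prefix of the dedup fold
theorem pvFoldlAdd_prefix (xs : List String) :
    ∀ acc : List String, ∃ t, List.foldl PySem.Set.add acc xs = acc ++ t := by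
  induction xs with
  | nil => exact fun acc => ⟨[], by simp⟩
  | cons x rest ih =>
    intro acc
    simp only [List.foldl_cons, PySem.Set.add, PySem.Set.contains]
    by_cases h : acc.contains x = true
    · rw [if_pos h]; exact ih acc
    · rw [if_neg h]
      obtain ⟨t, ht⟩ := ih (acc ++ [x])
      exact ⟨x :: t, by rw [ht]; simp⟩

-- A's loop equals "dedup the kept lines from the accumulator, then truncate",
-- while the accumulator is still strictly below a positive limit
theorem pvLoopA_eq (limit : Int) (lines : List String) :
    ∀ acc : List String, (acc.length : Int) < limit →
    pvLoopA lines acc limit = (List.foldl PySem.Set.add acc (lines.filter pvKeep)).take limit.toNat := by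
  induction lines with
  | nil =>
    intro acc h
    have hle : acc.length ≤ limit.toNat := by omega
    simp [pvLoopA, List.take_of_length_le hle]
  | cons line rest ih =>
    intro acc h
    simp only [pvLoopA, List.filter_cons]
    by_cases hbad : pvBad.any (fun x => PySem.Str.isIn x (PySem.Str.lower line)) = true
    · have hk : ¬ pvKeep line = true := by rw [pvKeep, hbad]; simp
      rw [if_pos hbad, if_neg hk]
      exact ih acc h
    · rw [if_neg hbad]
      by_cases hlen : PySem.Str.len line < 2
      · have hk : ¬ pvKeep line = true := by
          rw [pvKeep, eq_false_of_ne_true hbad]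
          simp only [Bool.not_false, Bool.and_true, decide_eq_true_eq]
          omega
        rw [if_pos hlen, if_neg hk]
        exact ih acc h
      · have hk : pvKeep line = true := by
          rw [pvKeep, eq_false_of_ne_true hbad]
          simp only [Bool.not_false, Bool.and_true, decide_eq_true_eq]
          omega
        rw [if_neg hlen, if_pos hk]
        simp only [List.foldl_cons, PySem.Set.add, PySem.Set.contains]
        by_cases hmem : acc.contains line = true
        · have hnb : ¬ ((acc.length : Int) ≥ limit) := by omega
          rw [if_pos hmem, if_neg hnb, if_pos hmem]
          exact ih acc h
        · rw [if_neg hmem, if_neg hmem]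
          by_cases hbrk : (((acc ++ [line]).length : Int) ≥ limit)
          · have hlenex : (acc ++ [line]).length = limit.toNat := by
              simp only [List.length_append, List.length_cons, List.length_nil] at hbrk ⊢
              omega
            obtain ⟨t, ht⟩ := pvFoldlAdd_prefix (rest.filter pvKeep) (acc ++ [line])
            rw [if_pos hbrk, ht, ← hlenex, List.take_append]
            simp
          · have h' : (((acc ++ [line]).length : Int) < limit) := by
              simp only [List.length_append, List.length_cons, List.length_nil] at hbrk ⊢
              push_cast at hbrk ⊢
              omega
            rw [if_neg hbrk]
            exact ih (acc ++ [line]) h'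

-- if no line is kept, A's loop never changes its accumulator
theorem pvLoopA_no_keep (limit : Int) (lines : List String)
    (hall : ∀ l ∈ lines, pvKeep l = false) : ∀ acc, pvLoopA lines acc limit = acc := by
  induction lines with
  | nil => intro acc; simp [pvLoopA]
  | cons line rest ih =>
    intro acc
    have hk : pvKeep line = false := hall line (by simp)
    have hrest : ∀ l ∈ rest, pvKeep l = false := fun l hl => hall l (by simp [hl])
    simp only [pvLoopA]
    by_cases hbad : pvBad.any (fun x => PySem.Str.isIn x (PySem.Str.lower line)) = true
    · rw [if_pos hbad]; exact ih hrest acc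
    · have hlen : PySem.Str.len line < 2 := by
        rw [pvKeep, eq_false_of_ne_true hbad] at hk
        simp only [Bool.not_false, Bool.and_true, decide_eq_false_iff_not] at hk
        omega
      rw [if_neg hbad, if_pos hlen]; exact ih hrest acc

-- with a non-positive limit and some surviving line, A returns a non-empty list
theorem pvLoopA_ne_nil (limit : Int) (hlim : limit ≤ 0) :
    ∀ lines : List String, (∃ l ∈ lines, pvKeep l = true) → pvLoopA lines [] limit ≠ [] := by
  intro lines
  induction lines with
  | nil => rintro ⟨l, hl, -⟩; simp at hl
  | cons line rest ih =>
    rintro ⟨l, hmem, hk⟩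
    simp only [pvLoopA]
    by_cases hx : pvKeep line = true
    · have hbad : ¬ (pvBad.any (fun x => PySem.Str.isIn x (PySem.Str.lower line)) = true) := by
        rw [pvKeep] at hx
        simp only [Bool.and_eq_true, Bool.not_eq_true'] at hx
        exact ne_true_of_eq_false hx.2
      have hlen : ¬ (PySem.Str.len line < 2) := by
        rw [pvKeep] at hx
        simp only [Bool.and_eq_true, decide_eq_true_eq] at hx
        omega
      rw [if_neg hbad, if_neg hlen]
      have hc : ([] : List String).contains line = false := by simp
      rw [hc]
      have hbrk : (((([] : List String) ++ [line]).length : Int) ≥ limit) := by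
        simp; omega
      simp only [if_false, Bool.false_eq_true]
      rw [if_pos hbrk]
      simp
    · have hl : l ∈ rest := by
        rcases List.mem_cons.mp hmem with h | h
        · exact absurd (h ▸ hk) hx
        · exact h
      have hkf : pvKeep line = false := eq_false_of_ne_true hx
      by_cases hb : pvBad.any (fun x => PySem.Str.isIn x (PySem.Str.lower line)) = true
      · rw [if_pos hb]; exact ih ⟨l, hl, hk⟩
      · have hlen : PySem.Str.len line < 2 := by
          rw [pvKeep, eq_false_of_ne_true hb] at hkf
          simp only [Bool.not_false, Bool.and_true, decide_eq_false_iff_not] at hkf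
          omega
        rw [if_neg hb, if_pos hlen]; exact ih ⟨l, hl, hk⟩

-- ===== VERDICT (by name: the statements are the Claim_ definitions above) =====
theorem clean_tracker_lines_spec : Claim_unchanged_clean_tracker_lines := by
  intro lines limit _ hnD
  show clean_tracker_lines lines limit = clean_tracker_lines_alt lines limit
  rw [clean_tracker_lines, clean_tracker_lines_alt]
  by_cases hpos : 0 < limit
  · have h0 : (([] : List String).length : Int) < limit := by simp; omega
    rw [pvLoopA_eq limit lines [] h0]
    simp only [if_pos hpos]
    rw [PySem.List.slice_to _ (le_of_lt hpos)]
    rfl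
  · have hlim : limit ≤ 0 := by omega
    have hall : ∀ l ∈ lines, pvKeep l = false := by
      intro l hl
      by_contra hne
      have hkt : pvKeep l = true := by simpa using hne
      exact hnD ⟨hlim, l, hl, (pvKeep_iff l).mp hkt⟩
    rw [pvLoopA_no_keep limit lines hall []]
    simp [hpos]

theorem clean_tracker_lines_changed : Claim_changed_clean_tracker_lines := by
  unfold Claim_changed_clean_tracker_lines; decide

theorem clean_tracker_lines_tight : Claim_exact_clean_tracker_lines := by
  intro lines limit _ hD
  obtain ⟨hlim, l, hl, hprop⟩ := hD
  have hne := pvLoopA_ne_nil limit hlim lines ⟨l, hl, (pvKeep_iff l).mpr hprop⟩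
  have hB : clean_tracker_lines_alt lines limit = [] := by
    have hnpos : ¬ 0 < limit := by omega
    simp [clean_tracker_lines_alt, hnpos]
  rw [clean_tracker_lines, hB]
  exact hne
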